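-- pv_equiv track=rewrite | github.com/Aditya-ray-9/ANL | Older Versions/ANL_6.py | _chunk_indices_even
-- ===== SOURCE A (Python) =====
-- import math
--
-- def _chunk_indices_even(total_bits: int, key_len: int):
--     if total_bits <= 0 or key_len <= 0:
--         return []
--     chunk_size = math.ceil(total_bits / key_len)
--     indices = []
--     for i in range(key_len):
--         start = i * chunk_size
--         end = min(start + chunk_size, total_bits)
--         if start >= total_bits:
--             break
--         indices.append((start, end))
--     return indices
-- ===== SOURCE B (Python) =====
-- def _chunk_indices_even(total_bits: int, key_len: int):
--     if total_bits <= 0 or key_len <= 0: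
--         return []
--     c = -(-total_bits // key_len)  # exact ceiling division
--     # Build the chunk list back-to-front: start from the ragged tail chunk at the
--     # end and walk down to 0 over the aligned boundaries, then reverse once.
--     out = []
--     end = total_bits
--     while end > 0:
--         start = ((end - 1) // c) * c  # largest chunk boundary strictly below end
--         out.append((start, end))
--         end = start
--     out.reverse()
--     return out
-- ===== Notes on version B (the rewrite author's own statement) =====
-- stated objective: alternative
-- what changed: B constructs the chunk list back-to-front: it walks downward from total_bits over the aligned chunk boundaries ((end-1)//c*c), so only the tail chunk is ragged and no min() is needed, then reverses once; A walks forward over range(key_len) computing start=i*chunk with min() and an explicit break.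
import Mathlib
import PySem

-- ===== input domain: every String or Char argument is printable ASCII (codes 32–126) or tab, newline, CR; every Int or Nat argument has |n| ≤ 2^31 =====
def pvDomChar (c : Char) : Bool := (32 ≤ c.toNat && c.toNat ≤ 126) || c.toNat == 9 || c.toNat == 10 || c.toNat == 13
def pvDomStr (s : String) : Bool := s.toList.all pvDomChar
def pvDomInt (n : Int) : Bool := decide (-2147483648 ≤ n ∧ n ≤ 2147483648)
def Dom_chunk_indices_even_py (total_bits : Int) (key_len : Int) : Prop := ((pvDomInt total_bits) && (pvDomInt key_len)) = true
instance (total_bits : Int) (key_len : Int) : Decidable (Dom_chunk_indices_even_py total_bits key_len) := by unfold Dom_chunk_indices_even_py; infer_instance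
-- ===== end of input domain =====

-- B builds the chunk list back-to-front: it walks down from total_bits over the aligned
-- chunk boundaries (no min, only the tail chunk is ragged) and reverses once (alternative
-- decomposition, same cost), vs A's forward index loop over range(key_len) with a break.


-- ===== PORT A =====
-- the `for i in range(key_len)` loop with its `break`: fuel = remaining range length
def chunkA_loop (total_bits chunk_size : Int) : Nat → Int → List (Int × Int) → List (Int × Int)
  | 0, _, acc => acc.reverse
  | n + 1, i, acc =>
    let start := i * chunk_size
    let e := min (start + chunk_size) total_bits
    if start ≥ total_bits then acc.reverse
    else chunkA_loop total_bits chunk_size n (i + 1) ((start, e) :: acc)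

-- math.ceil(total_bits / key_len) ported as exact ceiling division -((-total_bits) // key_len):
-- exact on Dom (|n| ≤ 2^31), where the float quotient's rounding error is below 1/key_len.
def chunk_indices_even_py (total_bits : Int) (key_len : Int) : List (Int × Int) :=
  if total_bits ≤ 0 ∨ key_len ≤ 0 then []
  else
    let chunk_size := -(PySem.Int.floordiv (-total_bits) key_len)
    chunkA_loop total_bits chunk_size key_len.toNat 0 []

-- ===== PORT B =====
-- `while end > 0: start = ((end-1)//c)*c; out.append((start, end)); end = start`
def chunkB_back (c : Int) (hc : 0 < c) (e : Int) : List (Int × Int) :=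
  if he : 0 < e then
    (PySem.Int.floordiv (e - 1) c * c, e) :: chunkB_back c hc (PySem.Int.floordiv (e - 1) c * c)
  else []
termination_by e.toNat
decreasing_by
  rw [PySem.Int.floordiv_eq_ediv_of_pos hc]
  have h1 := Int.ediv_add_emod (e - 1) c
  have h2 := Int.emod_nonneg (e - 1) (ne_of_gt hc)
  have h3 : 0 ≤ (e - 1) / c := Int.ediv_nonneg (by omega) (le_of_lt hc)
  have h4 : (e - 1) / c * c ≤ e - 1 := by nlinarith
  have h5 : 0 ≤ (e - 1) / c * c := mul_nonneg h3 (le_of_lt hc)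
  omega

def chunk_indices_even_py_alt (total_bits : Int) (key_len : Int) : List (Int × Int) :=
  if h : total_bits ≤ 0 ∨ key_len ≤ 0 then []
  else
    (chunkB_back (-(PySem.Int.floordiv (-total_bits) key_len))
      (by
        rcases not_or.mp h with ⟨h1, h2⟩
        have := (PySem.Int.neg_floordiv_neg_eq_iff_of_pos (a := total_bits)
          (b := key_len) (q := -(PySem.Int.floordiv (-total_bits) key_len)) (by omega)).mp rfl
        nlinarith [this.1, this.2]) total_bits).reverse

-- ===== PRECONDITION & SPEC =====
def Spec_chunk_indices_even_py (total_bits : Int) (key_len : Int) (out : List (Int × Int)) : Prop := out = chunk_indices_even_py_alt total_bits key_len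
instance (total_bits : Int) (key_len : Int) (out : List (Int × Int)) : Decidable (Spec_chunk_indices_even_py total_bits key_len out) := by unfold Spec_chunk_indices_even_py; infer_instance

-- ===== CLAIM (what is proved, stated in full; the proofs are below) =====
def Claim_equal_chunk_indices_even_py : Prop := ∀ (total_bits : Int) (key_len : Int), Dom_chunk_indices_even_py total_bits key_len → Spec_chunk_indices_even_py total_bits key_len (chunk_indices_even_py total_bits key_len)

-- ===== LEMMAS AND PROOFS =====

-- proof-only canonical form: the chunks of [s, bound) stepping forward by c
def fwdChunks (bound c : Int) (hc : 0 < c) (s : Int) : List (Int × Int) :=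
  if s < bound then (s, min (s + c) bound) :: fwdChunks bound c hc (s + c) else []
termination_by (bound - s).toNat
decreasing_by omega

-- A's loop, given enough fuel, produces exactly the forward chunk list from i*c
theorem chunkA_eq_fwd (total_bits c : Int) (hc : 0 < c) :
    ∀ (n : Nat) (i : Int) (acc : List (Int × Int)),
      total_bits ≤ (i + n) * c →
      chunkA_loop total_bits c n i acc = acc.reverse ++ fwdChunks total_bits c hc (i * c) := by
  intro n
  induction n with
  | zero =>
    intro i acc h
    rw [chunkA_loop, fwdChunks]
    simp at h
    rw [if_neg (by omega)]
    simp
  | succ n ih =>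
    intro i acc h
    rw [chunkA_loop, fwdChunks]
    by_cases hs : i * c ≥ total_bits
    · rw [if_pos hs, if_neg (by omega)]
      simp
    · rw [if_neg hs, if_pos (by omega)]
      rw [ih (i + 1) _ (by push_cast at h ⊢; nlinarith)]
      simp [add_mul]

-- splitting off the last (ragged) chunk: from any start p that is s minus a multiple of c,
-- the forward chunks of [p, e) are those of [p, s) followed by (s, e)
theorem fwd_split (e c : Int) (hc : 0 < c) (s : Int) (hse : s ≤ e - 1) (hes : e ≤ s + c) :
    ∀ (m : Nat) (p : Int), p = s - m * c → 0 ≤ p →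
      fwdChunks e c hc p = fwdChunks s c hc p ++ [(s, e)] := by
  intro m
  induction m with
  | zero =>
    intro p hp _
    have hp' : s = p := by simpa using hp.symm
    subst hp'
    rw [fwdChunks, if_pos (by omega)]
    rw [show fwdChunks e c hc (s + c) = [] by rw [fwdChunks, if_neg (by omega)]]
    rw [show fwdChunks s c hc s = [] by rw [fwdChunks, if_neg (by omega)]]
    simp
    omega
  | succ m ih =>
    intro p hp hp0
    have hmnn : (0:Int) ≤ (m : Int) * c := mul_nonneg (by positivity) hc.le
    have hpc : p + c = s - m * c := by push_cast at hp ⊢; linarith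
    have hps : p + c ≤ s := by linarith [hmnn, hpc]
    have hA : fwdChunks e c hc p = (p, min (p + c) e) :: fwdChunks e c hc (p + c) := by
      rw [fwdChunks, if_pos (by omega)]
    have hB : fwdChunks s c hc p = (p, min (p + c) s) :: fwdChunks s c hc (p + c) := by
      rw [fwdChunks, if_pos (by omega)]
    have hmin : min (p + c) e = min (p + c) s := by omega
    rw [hA, hB, ih (p + c) hpc (by omega), hmin]
    simp

-- B's backward walk is the reverse of the forward chunk list of [0, e)
theorem back_eq_fwd_rev (c : Int) (hc : 0 < c) :
    ∀ (n : Nat) (e : Int), e.toNat ≤ n →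
      chunkB_back c hc e = (fwdChunks e c hc 0).reverse := by
  intro n
  induction n with
  | zero =>
    intro e he
    rw [chunkB_back, dif_neg (by omega), fwdChunks, if_neg (by omega)]
    simp
  | succ n ih =>
    intro e he
    by_cases hpos : 0 < e
    · have hfd := PySem.Int.floordiv_eq_ediv_of_pos (a := e - 1) hc
      have h1 : (e - 1) / c * c + (e - 1) % c = e - 1 := by
        rw [mul_comm]; exact Int.ediv_add_emod _ _
      have h2 := Int.emod_nonneg (e - 1) (ne_of_gt hc)
      have h3 := Int.emod_lt_of_pos (e - 1) hc
      have hq : 0 ≤ (e - 1) / c := Int.ediv_nonneg (by omega) hc.le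
      set S := PySem.Int.floordiv (e - 1) c * c with hSdef
      have hSeq : S = (e - 1) / c * c := by rw [hSdef, hfd]
      have hs0 : 0 ≤ S := by rw [hSeq]; exact mul_nonneg hq hc.le
      have hse : S ≤ e - 1 := by rw [hSeq]; omega
      have hes : e ≤ S + c := by rw [hSeq]; omega
      have hzero : (0:Int) = S - ((e - 1) / c).toNat * c := by
        rw [hSeq]
        have hcast : (((e - 1) / c).toNat : Int) = (e - 1) / c := Int.toNat_of_nonneg hq
        rw [hcast]; ring
      rw [chunkB_back, dif_pos hpos, ← hSdef,
          fwd_split e c hc S hse hes ((e - 1) / c).toNat 0 hzero le_rfl,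
          ih S (by omega)]
      simp
    · rw [chunkB_back, dif_neg hpos, fwdChunks, if_neg (by omega)]
      simp

theorem chunk_indices_even_py_eq (total_bits key_len : Int) :
    chunk_indices_even_py total_bits key_len = chunk_indices_even_py_alt total_bits key_len := by
  unfold chunk_indices_even_py chunk_indices_even_py_alt
  by_cases h : total_bits ≤ 0 ∨ key_len ≤ 0
  · rw [if_pos h, dif_pos h]
  · rw [if_neg h, dif_neg h]
    rcases not_or.mp h with ⟨h1, h2⟩
    have hceil := (PySem.Int.neg_floordiv_neg_eq_iff_of_pos (a := total_bits)
      (b := key_len) (q := -(PySem.Int.floordiv (-total_bits) key_len)) (by omega)).mp rfl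
    have hc : 0 < -(PySem.Int.floordiv (-total_bits) key_len) := by nlinarith [hceil.1, hceil.2]
    rw [back_eq_fwd_rev _ hc total_bits.toNat total_bits le_rfl]
    rw [chunkA_eq_fwd total_bits _ hc key_len.toNat 0 [] (by
      have : ((key_len.toNat : Int)) = key_len := by omega
      rw [zero_add, this]
      nlinarith [hceil.2])]
    simp

-- ===== VERDICT (by name: the statement is the Claim_ definition above) =====
theorem chunk_indices_even_py_spec : Claim_equal_chunk_indices_even_py := by
  intro total_bits key_len _
  unfold Spec_chunk_indices_even_py
  exact chunk_indices_even_py_eq total_bits key_len
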